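-- pv_equiv track=rewrite | github.com/Ha4sh-447/Scout-ai | scrapers/page_loader.py | _pick_search_param_key
-- ===== SOURCE A (Python) =====
-- def _pick_search_param_key(params: dict[str, list[str]]) -> str | None:
--     """Pick the most likely existing query-intent key from URL params."""
--     if not params:
--         return None
--
--     priority_keys = [
--         "q", "query", "keyword", "keywords", "search", "searchtext", "k", "term", "text", "wd", "what",
--         "roles", "skills", "title", "position", "job_title",
--     ]
--
--     lower_to_original = {k.lower(): k for k in params.keys()}
--     for key in priority_keys:
--         if key in lower_to_original:
--             return lower_to_original[key]
--
--     for original_key in params.keys():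
--         k = original_key.lower()
--         if any(token in k for token in ["query", "search", "keyword", "role", "skill", "title", "position", "term"]):
--             return original_key
--
--     return None
-- ===== SOURCE B (Python) =====
-- def _pick_search_param_key(params: dict[str, list[str]]) -> str | None:
--     """Pick the most likely existing query-intent key from URL params.
--
--     Single pass over the keys keeping two pieces of state: the best exact
--     priority candidate (minimal rank; later key wins a rank tie, matching the
--     last-wins behaviour of a lowercasing dict) and the first substring-token
--     fallback candidate.
--     """
--     if not params:
--         return None
--
--     priority_keys = [
--         "q", "query", "keyword", "keywords", "search", "searchtext", "k", "term", "text", "wd", "what",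
--         "roles", "skills", "title", "position", "job_title",
--     ]
--     rank = {k: i for i, k in enumerate(priority_keys)}
--     tokens = ["query", "search", "keyword", "role", "skill", "title", "position", "term"]
--
--     best = None      # (rank, original key)
--     fallback = None  # first key whose lowercase contains a token
--     for key in params:
--         low = key.lower()
--         r = rank.get(low)
--         if r is not None:
--             if best is None or r <= best[0]:
--                 best = (r, key)
--         elif fallback is None and any(t in low for t in tokens):
--             fallback = key
--
--     if best is not None:
--         return best[1]
--     return fallback
-- ===== Notes on version B (the rewrite author's own statement) =====
-- stated objective: alternative
-- what changed: Replaced A's three sequential passes (build a lowercase->original dict, scan the 16 priority keys against it, then rescan params for a substring token) by one fold over params that maintains two state cells - the best exact-priority candidate (minimal rank, last key wins a rank tie, via a precomputed key->rank dict) and the first substring-fallback candidate - rendered after the loop.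
import Mathlib
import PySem

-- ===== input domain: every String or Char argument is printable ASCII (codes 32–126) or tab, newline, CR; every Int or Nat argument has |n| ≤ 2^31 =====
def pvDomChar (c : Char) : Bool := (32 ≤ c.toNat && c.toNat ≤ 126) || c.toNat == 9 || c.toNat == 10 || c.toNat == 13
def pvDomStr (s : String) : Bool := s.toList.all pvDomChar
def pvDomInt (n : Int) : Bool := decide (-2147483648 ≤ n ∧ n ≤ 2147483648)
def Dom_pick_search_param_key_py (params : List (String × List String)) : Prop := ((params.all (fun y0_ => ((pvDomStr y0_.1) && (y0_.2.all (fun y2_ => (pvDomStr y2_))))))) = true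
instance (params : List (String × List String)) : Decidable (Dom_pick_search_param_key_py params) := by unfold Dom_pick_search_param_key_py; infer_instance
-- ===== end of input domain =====

-- B replaces A's three passes (lowercase→original dict, priority-list scan, token rescan) by ONE fold over params
-- maintaining the best exact-priority candidate and the first token-fallback candidate (objective: alternative).

-- ===== PORT A =====
def pvPriorityKeys : List String :=
  ["q", "query", "keyword", "keywords", "search", "searchtext", "k", "term", "text", "wd", "what",
   "roles", "skills", "title", "position", "job_title"]

def pvATokens : List String :=
  ["query", "search", "keyword", "role", "skill", "title", "position", "term"]

-- lower_to_original = {k.lower(): k for k in params.keys()}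
def pvLowerToOriginal (keys : List String) : PySem.Dict String String :=
  keys.foldl (fun d k => d.insert (PySem.Str.lower k) k) PySem.Dict.empty

-- for key in priority_keys: if key in lower_to_original: return lower_to_original[key]
def pvPriorityScan (d : PySem.Dict String String) : List String → Option String
  | [] => none
  | p :: ps =>
    match d.get? p with
    | some v => some v
    | none => pvPriorityScan d ps

-- for original_key in params.keys(): if any(token in k for token in [...]): return original_key
def pvFallbackScan : List String → Option String
  | [] => none
  | k :: ks =>
    if pvATokens.any (fun token => PySem.Str.isIn token (PySem.Str.lower k)) then some k
    else pvFallbackScan ks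

def pick_search_param_key_py (params : List (String × List String)) : Option String :=
  if params = [] then none
  else
    match pvPriorityScan (pvLowerToOriginal (params.map (·.1))) pvPriorityKeys with
    | some v => some v
    | none => pvFallbackScan (params.map (·.1))

-- ===== PORT B =====
def pvBPriorityKeys : List String :=
  ["q", "query", "keyword", "keywords", "search", "searchtext", "k", "term", "text", "wd", "what",
   "roles", "skills", "title", "position", "job_title"]

def pvBTokens : List String :=
  ["query", "search", "keyword", "role", "skill", "title", "position", "term"]

-- rank = {k: i for i, k in enumerate(priority_keys)}
def pvRankDict : PySem.Dict String Int :=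
  (PySem.List.enumerate pvBPriorityKeys).foldl (fun d q => d.insert q.2 q.1) PySem.Dict.empty

-- one iteration of B's loop over the keys (state = (best, fallback))
def pvBStep (st : Option (Int × String) × Option String) (key : String) :
    Option (Int × String) × Option String :=
  let low := PySem.Str.lower key
  match pvRankDict.get? low with
  | some r =>
    match st.1 with
    | none => (some (r, key), st.2)
    | some b => if r ≤ b.1 then (some (r, key), st.2) else st
  | none =>
    match st.2 with
    | none =>
      if pvBTokens.any (fun t => PySem.Str.isIn t low) then (st.1, some key) else st
    | some _ => st

def pick_search_param_key_py_alt (params : List (String × List String)) : Option String :=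
  if params = [] then none
  else
    match params.foldl (fun st p => pvBStep st p.1) (none, none) with
    | (some b, _) => some b.2
    | (none, f) => f

-- ===== PRECONDITION & SPEC =====
def Spec_pick_search_param_key_py (params : List (String × List String)) (out : Option String) : Prop := out = pick_search_param_key_py_alt params
instance (params : List (String × List String)) (out : Option String) : Decidable (Spec_pick_search_param_key_py params out) := by unfold Spec_pick_search_param_key_py; infer_instance

-- ===== CLAIM (what is proved, stated in full; the proofs are below) =====
def Claim_equal_pick_search_param_key_py : Prop := ∀ (params : List (String × List String)), Dom_pick_search_param_key_py params → Spec_pick_search_param_key_py params (pick_search_param_key_py params)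

-- ===== LEMMAS AND PROOFS =====

-- B's best-candidate update, on its own
def pvBestStep (b : Option (Int × String)) (key : String) : Option (Int × String) :=
  match pvRankDict.get? (PySem.Str.lower key) with
  | some r =>
    match b with
    | none => some (r, key)
    | some p => if r ≤ p.1 then some (r, key) else b
  | none => b

-- B's fallback update, on its own
def pvFbStep (f : Option String) (key : String) : Option String :=
  match pvRankDict.get? (PySem.Str.lower key) with
  | some _ => f
  | none =>
    match f with
    | none => if pvBTokens.any (fun t => PySem.Str.isIn t (PySem.Str.lower key)) then some key else f
    | some _ => f

lemma pvBStep_decomp (st : Option (Int × String) × Option String) (k : String) :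
    pvBStep st k = (pvBestStep st.1 k, pvFbStep st.2 k) := by
  rcases st with ⟨b, f⟩
  simp only [pvBStep, pvBestStep, pvFbStep]
  cases h : pvRankDict.get? (PySem.Str.lower k) with
  | some r =>
    cases b with
    | none => rfl
    | some p => dsimp only; split <;> rfl
  | none => cases f <;> first | rfl | (dsimp only; split <;> rfl)

lemma pvFold_decomp (ks : List String) (b : Option (Int × String)) (f : Option String) :
    ks.foldl pvBStep (b, f) = (ks.foldl pvBestStep b, ks.foldl pvFbStep f) := by
  induction ks generalizing b f with
  | nil => rfl
  | cons k ks ih => simp only [List.foldl_cons, pvBStep_decomp]; exact ih _ _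

lemma pvIdxOf?_idxOf (l : List String) (x : String) (n : Nat) (h : l.idxOf? x = some n) :
    l.idxOf x = n := by
  simp [List.idxOf_eq_getD_idxOf?, h]

lemma pvEnumFold_get?_not_mem (pl : List String) (s : Int) (d : PySem.Dict String Int)
    (p : String) (hp : p ∉ pl) :
    ((PySem.List.enumerate pl s).foldl (fun d q => d.insert q.2 q.1) d).get? p = d.get? p := by
  induction pl generalizing s d with
  | nil => rfl
  | cons k pl ih =>
    rw [PySem.List.enumerate_cons, List.foldl_cons,
      ih _ _ (fun h => hp (List.mem_cons_of_mem _ h))]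
    exact PySem.Dict.get?_insert_of_ne _ _ (by intro h; subst h; exact hp List.mem_cons_self)

lemma pvEnumFold_get?_mem (pl : List String) (s : Int) (d : PySem.Dict String Int)
    (p : String) (hp : p ∈ pl) (hnd : pl.Nodup) :
    ((PySem.List.enumerate pl s).foldl (fun d q => d.insert q.2 q.1) d).get? p
      = some (s + (pl.idxOf p : Int)) := by
  induction pl generalizing s d with
  | nil => cases hp
  | cons k pl ih =>
    rw [PySem.List.enumerate_cons, List.foldl_cons]
    by_cases hpk : p = k
    · subst hpk
      have hnp : p ∉ pl := (List.nodup_cons.mp hnd).1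
      rw [pvEnumFold_get?_not_mem pl (s + 1) _ p hnp, PySem.Dict.get?_insert_self,
        List.idxOf_cons_self]
      simp
    · have hmem : p ∈ pl := (List.mem_cons.mp hp).resolve_left hpk
      rw [ih _ _ hmem (List.nodup_cons.mp hnd).2]
      have hix : (k :: pl).idxOf p = pl.idxOf p + 1 := by
        simp [List.idxOf_cons, beq_eq_false_iff_ne.mpr (fun h => hpk h.symm)]
      rw [hix]
      congr 1
      push_cast
      ring

lemma pvRank_char (p : String) :
    pvRankDict.get? p = (pvPriorityKeys.idxOf? p).map (fun n => (n : Int)) := by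
  have hBA : pvBPriorityKeys = pvPriorityKeys := rfl
  by_cases hp : p ∈ pvPriorityKeys
  · have hnd : pvPriorityKeys.Nodup := by decide
    have hsome : ∃ j, pvPriorityKeys.idxOf? p = some j := by
      cases h : pvPriorityKeys.idxOf? p with
      | none => exact absurd (List.idxOf?_eq_none_iff.mp h) (by simpa using hp)
      | some j => exact ⟨j, rfl⟩
    obtain ⟨j, hj⟩ := hsome
    unfold pvRankDict
    rw [hBA, pvEnumFold_get?_mem pvPriorityKeys 0 PySem.Dict.empty p hp hnd, hj,
      pvIdxOf?_idxOf _ _ _ hj]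
    simp
  · unfold pvRankDict
    rw [hBA, pvEnumFold_get?_not_mem pvPriorityKeys 0 PySem.Dict.empty p hp,
      List.idxOf?_eq_none_iff.mpr hp]
    rfl

-- every binding of lower_to_original maps lower(w) ↦ w
lemma pvLower_sound_aux (ks : List String) (d : PySem.Dict String String)
    (hd : ∀ p w, d.get? p = some w → p = PySem.Str.lower w) :
    ∀ p w, (ks.foldl (fun d k => d.insert (PySem.Str.lower k) k) d).get? p = some w →
      p = PySem.Str.lower w := by
  induction ks generalizing d with
  | nil => exact hd
  | cons k ks ih =>
    refine ih _ (fun p w h => ?_)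
    by_cases hp : p = PySem.Str.lower k
    · subst hp; rw [PySem.Dict.get?_insert_self] at h; cases h; rfl
    · exact hd p w (by rwa [PySem.Dict.get?_insert_of_ne _ _ hp] at h)

lemma pvLower_sound (ks : List String) :
    ∀ p w, (pvLowerToOriginal ks).get? p = some w → p = PySem.Str.lower w := by
  refine pvLower_sound_aux ks PySem.Dict.empty ?_
  intro p w h
  rw [show (PySem.Dict.empty : PySem.Dict String String).get? p = none from rfl] at h
  cases h

lemma pvFoldl_insert_preserve (ks : List String) (d : PySem.Dict String String) (p : String)
    (h : ∃ w, d.get? p = some w) :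
    ∃ w, (ks.foldl (fun d k => d.insert (PySem.Str.lower k) k) d).get? p = some w := by
  induction ks generalizing d with
  | nil => exact h
  | cons k ks ih =>
    refine ih _ ?_
    by_cases hp : p = PySem.Str.lower k
    · subst hp; exact ⟨k, PySem.Dict.get?_insert_self _ _ _⟩
    · obtain ⟨w, hw⟩ := h; exact ⟨w, by rwa [PySem.Dict.get?_insert_of_ne _ _ hp]⟩

lemma pvLower_mem_aux (ks : List String) (d : PySem.Dict String String) (k : String)
    (hk : k ∈ ks) :
    ∃ w, (ks.foldl (fun d k => d.insert (PySem.Str.lower k) k) d).get? (PySem.Str.lower k)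
      = some w := by
  induction ks generalizing d with
  | nil => cases hk
  | cons a ks ih =>
    rw [List.foldl_cons]
    rcases List.mem_cons.mp hk with rfl | hk'
    · exact pvFoldl_insert_preserve ks _ _ ⟨k, PySem.Dict.get?_insert_self _ _ _⟩
    · exact ih _ hk'

lemma pvLower_mem (ks : List String) (k : String) (hk : k ∈ ks) :
    ∃ w, (pvLowerToOriginal ks).get? (PySem.Str.lower k) = some w :=
  pvLower_mem_aux ks PySem.Dict.empty k hk

lemma pvPriorityScan_none (d : PySem.Dict String String) (pl : List String)
    (h : pvPriorityScan d pl = none) : ∀ p ∈ pl, d.get? p = none := by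
  induction pl with
  | nil => intro p hp; cases hp
  | cons q pl ih =>
    intro p hp
    unfold pvPriorityScan at h
    cases hq : d.get? q with
    | some v => rw [hq] at h; cases h
    | none =>
      rw [hq] at h
      rcases List.mem_cons.mp hp with rfl | hp
      · exact hq
      · exact ih h p hp

lemma pvPriorityScan_some (d : PySem.Dict String String) (pl : List String) (k : String)
    (h : pvPriorityScan d pl = some k) : ∃ p ∈ pl, d.get? p = some k := by
  induction pl with
  | nil => cases h
  | cons q pl ih =>
    unfold pvPriorityScan at h
    cases hq : d.get? q with
    | some v => rw [hq] at h; cases h; exact ⟨q, List.mem_cons_self, hq⟩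
    | none =>
      rw [hq] at h
      obtain ⟨p, hp, hpd⟩ := ih h
      exact ⟨p, List.mem_cons_of_mem _ hp, hpd⟩

-- how A's priority scan reacts to one more (lower v ↦ v) insertion
lemma pvPriorityScan_insert (pl : List String) (hn : pl.Nodup) (d : PySem.Dict String String)
    (h3 : ∀ p w, d.get? p = some w → p = PySem.Str.lower w) (v : String) :
    pvPriorityScan (d.insert (PySem.Str.lower v) v) pl =
      if PySem.Str.lower v ∈ pl then
        match pvPriorityScan d pl with
        | none => some v
        | some k' =>
          if pl.idxOf (PySem.Str.lower v) ≤ pl.idxOf (PySem.Str.lower k') then some v else some k'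
      else pvPriorityScan d pl := by
  induction pl with
  | nil => simp [pvPriorityScan]
  | cons p rest ih =>
    have hnr : rest.Nodup := hn.of_cons
    have hpnr : p ∉ rest := (List.nodup_cons.mp hn).1
    by_cases hpl : PySem.Str.lower v = p
    · subst hpl
      have hmem : PySem.Str.lower v ∈ PySem.Str.lower v :: rest := List.mem_cons_self
      have hL : pvPriorityScan (d.insert (PySem.Str.lower v) v) (PySem.Str.lower v :: rest)
          = some v := by
        simp [pvPriorityScan, PySem.Dict.get?_insert_self]
      rw [hL, if_pos hmem]
      cases hq : d.get? (PySem.Str.lower v) with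
      | some w =>
        have hscan : pvPriorityScan d (PySem.Str.lower v :: rest) = some w := by
          simp [pvPriorityScan, hq]
        rw [hscan]
        have hvw := h3 _ _ hq
        simp [← hvw]
      | none =>
        have hscan : pvPriorityScan d (PySem.Str.lower v :: rest) = pvPriorityScan d rest := by
          simp [pvPriorityScan, hq]
        rw [hscan]
        cases pvPriorityScan d rest with
        | none => rfl
        | some k' => simp [List.idxOf_cons_self]
    · have hLhead : (d.insert (PySem.Str.lower v) v).get? p = d.get? p :=
        PySem.Dict.get?_insert_of_ne _ _ (fun h => hpl h.symm)
      cases hq : d.get? p with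
      | some w =>
        have hscanL : pvPriorityScan (d.insert (PySem.Str.lower v) v) (p :: rest) = some w := by
          simp [pvPriorityScan, hLhead, hq]
        have hscanR : pvPriorityScan d (p :: rest) = some w := by
          simp [pvPriorityScan, hq]
        rw [hscanL, hscanR]
        by_cases hm : PySem.Str.lower v ∈ p :: rest
        · rw [if_pos hm]
          have hw := h3 _ _ hq
          have h1 : (p :: rest).idxOf (PySem.Str.lower w) = 0 := by
            rw [← hw]; exact List.idxOf_cons_self
          have h2 : (p :: rest).idxOf (PySem.Str.lower v) = rest.idxOf (PySem.Str.lower v) + 1 := by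
            simp [List.idxOf_cons, beq_eq_false_iff_ne.mpr (fun h => hpl h.symm)]
          simp [h1, h2]
        · rw [if_neg hm]
      | none =>
        have hscanL : pvPriorityScan (d.insert (PySem.Str.lower v) v) (p :: rest)
            = pvPriorityScan (d.insert (PySem.Str.lower v) v) rest := by
          simp [pvPriorityScan, hLhead, hq]
        have hscanR : pvPriorityScan d (p :: rest) = pvPriorityScan d rest := by
          simp [pvPriorityScan, hq]
        rw [hscanL, hscanR, ih hnr]
        by_cases hm : PySem.Str.lower v ∈ rest
        · have hm' : PySem.Str.lower v ∈ p :: rest := List.mem_cons_of_mem _ hm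
          rw [if_pos hm, if_pos hm']
          cases hr : pvPriorityScan d rest with
          | none => rfl
          | some k' =>
            obtain ⟨p', hp', hpd'⟩ := pvPriorityScan_some d rest k' hr
            have hk' : p' = PySem.Str.lower k' := h3 _ _ hpd'
            have hkp : p ≠ PySem.Str.lower k' := by
              intro h; rw [← hk'] at h; exact hpnr (h ▸ hp')
            have h2 : (p :: rest).idxOf (PySem.Str.lower v) = rest.idxOf (PySem.Str.lower v) + 1 := by
              simp [List.idxOf_cons, beq_eq_false_iff_ne.mpr (fun h => hpl h.symm)]
            have h4 : (p :: rest).idxOf (PySem.Str.lower k') = rest.idxOf (PySem.Str.lower k') + 1 := by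
              simp [List.idxOf_cons, beq_eq_false_iff_ne.mpr hkp]
            simp [h2, h4]
        · have hm' : PySem.Str.lower v ∉ p :: rest := by
            intro h
            rcases List.mem_cons.mp h with h | h
            · exact hpl h
            · exact hm h
          rw [if_neg hm, if_neg hm']

-- the combined invariant of B's best-candidate fold against A's dict + priority scan
lemma pvMain_inv (ks : List String) :
    pvPriorityScan (pvLowerToOriginal ks) pvPriorityKeys = (ks.foldl pvBestStep none).map (·.2)
    ∧ (∀ r k, ks.foldl pvBestStep none = some (r, k) →
        pvRankDict.get? (PySem.Str.lower k) = some r) := by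
  induction ks using List.reverseRecOn with
  | nil => exact ⟨rfl, by intro r k h; cases h⟩
  | append_singleton ks k0 ih =>
    obtain ⟨ih1, ih2⟩ := ih
    have hd : pvLowerToOriginal (ks ++ [k0]) =
        (pvLowerToOriginal ks).insert (PySem.Str.lower k0) k0 := by
      simp [pvLowerToOriginal, List.foldl_append]
    have hb : (ks ++ [k0]).foldl pvBestStep none = pvBestStep (ks.foldl pvBestStep none) k0 := by
      simp [List.foldl_append]
    have hnd : pvPriorityKeys.Nodup := by decide
    have hins := pvPriorityScan_insert pvPriorityKeys hnd (pvLowerToOriginal ks)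
      (pvLower_sound ks) k0
    rw [hd, hb, hins]
    by_cases hm : PySem.Str.lower k0 ∈ pvPriorityKeys
    · have hsome : ∃ j, pvPriorityKeys.idxOf? (PySem.Str.lower k0) = some j := by
        cases h : pvPriorityKeys.idxOf? (PySem.Str.lower k0) with
        | none => exact absurd (List.idxOf?_eq_none_iff.mp h) (by simpa using hm)
        | some j => exact ⟨j, rfl⟩
      obtain ⟨j, hj⟩ := hsome
      have hrk : pvRankDict.get? (PySem.Str.lower k0) = some (j : Int) := by
        rw [pvRank_char, hj]; rfl
      have hjj : pvPriorityKeys.idxOf (PySem.Str.lower k0) = j := pvIdxOf?_idxOf _ _ _ hj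
      rw [if_pos hm]
      cases hbv : ks.foldl pvBestStep none with
      | none =>
        rw [ih1, hbv]
        constructor
        · simp [pvBestStep, hrk]
        · intro r k h
          simp only [pvBestStep, hrk] at h
          cases h; exact hrk
      | some p =>
        obtain ⟨br, kb⟩ := p
        have hrkb : pvRankDict.get? (PySem.Str.lower kb) = some br := ih2 br kb hbv
        have hjb : ∃ jb : Nat, pvPriorityKeys.idxOf? (PySem.Str.lower kb) = some jb ∧ br = (jb : Int) := by
          rw [pvRank_char] at hrkb
          cases h : pvPriorityKeys.idxOf? (PySem.Str.lower kb) with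
          | none => rw [h] at hrkb; cases hrkb
          | some jb => rw [h] at hrkb; exact ⟨jb, rfl, (Option.some_inj.mp hrkb).symm⟩
        obtain ⟨jb, hjb1, hjb2⟩ := hjb
        subst hjb2
        have hjjb : pvPriorityKeys.idxOf (PySem.Str.lower kb) = jb := pvIdxOf?_idxOf _ _ _ hjb1
        rw [ih1, hbv]
        simp only [pvBestStep, hrk, hjj, hjjb, Option.map_some]
        by_cases hle : j ≤ jb
        · rw [if_pos hle, if_pos (by exact_mod_cast hle)]
          exact ⟨rfl, by intro r k h; cases h; exact hrk⟩
        · rw [if_neg hle, if_neg (by exact_mod_cast hle)]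
          exact ⟨rfl, by intro r k h; cases h; exact hrkb⟩
    · have hnone : pvRankDict.get? (PySem.Str.lower k0) = none := by
        rw [pvRank_char, List.idxOf?_eq_none_iff.mpr (by simpa using hm)]; rfl
      rw [if_neg hm]
      constructor
      · simp only [pvBestStep, hnone]; exact ih1
      · intro r k h
        simp only [pvBestStep, hnone] at h
        exact ih2 r k h

lemma pvFbStep_some (ks : List String) (x : String) :
    ks.foldl pvFbStep (some x) = some x := by
  induction ks with
  | nil => rfl
  | cons k ks ih =>
    have h : pvFbStep (some x) k = some x := by
      unfold pvFbStep
      cases pvRankDict.get? (PySem.Str.lower k) <;> rfl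
    rw [List.foldl_cons, h, ih]

lemma pvFallback_eq (ks : List String)
    (h : ∀ k ∈ ks, pvRankDict.get? (PySem.Str.lower k) = none) :
    pvFallbackScan ks = ks.foldl pvFbStep none := by
  induction ks with
  | nil => rfl
  | cons k ks ih =>
    have hk := h k List.mem_cons_self
    have hrest : ∀ k' ∈ ks, pvRankDict.get? (PySem.Str.lower k') = none :=
      fun k' hk' => h k' (List.mem_cons_of_mem _ hk')
    have hstep : pvFbStep none k =
        if pvBTokens.any (fun t => PySem.Str.isIn t (PySem.Str.lower k)) then some k
        else none := by
      simp only [pvFbStep, hk]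
    have htok : pvATokens = pvBTokens := rfl
    rw [List.foldl_cons, hstep]
    show pvFallbackScan (k :: ks) = _
    unfold pvFallbackScan
    rw [htok]
    by_cases ht : pvBTokens.any (fun t => PySem.Str.isIn t (PySem.Str.lower k)) = true
    · rw [if_pos ht, if_pos ht, pvFbStep_some]
    · rw [if_neg ht, if_neg ht]
      exact ih hrest

-- ===== VERDICT (by name: the statement is the Claim_ definition above) =====
theorem pick_search_param_key_py_spec : Claim_equal_pick_search_param_key_py := by
  intro params _
  unfold Spec_pick_search_param_key_py pick_search_param_key_py pick_search_param_key_py_alt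
  by_cases hp : params = []
  · rw [if_pos hp, if_pos hp]
  · rw [if_neg hp, if_neg hp]
    set ks := params.map (·.1) with hks
    have hfold : params.foldl (fun st p => pvBStep st p.1) (none, none)
        = (ks.foldl pvBestStep none, ks.foldl pvFbStep none) := by
      have h1 : List.foldl pvBStep ((none : Option (Int × String)), (none : Option String)) ks
          = params.foldl (fun st p => pvBStep st p.1) (none, none) := by
        rw [hks, List.foldl_map]
      rw [← h1, pvFold_decomp]
    obtain ⟨h1, h2⟩ := pvMain_inv ks
    rw [hfold]
    cases hbv : ks.foldl pvBestStep none with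
    | some b =>
      rw [h1, hbv]
      rfl
    | none =>
      rw [h1, hbv]
      simp only [Option.map_none]
      have hnone : ∀ k ∈ ks, pvRankDict.get? (PySem.Str.lower k) = none := by
        intro k hk
        cases hr : pvRankDict.get? (PySem.Str.lower k) with
        | none => rfl
        | some r =>
          rw [pvRank_char] at hr
          have hmem : PySem.Str.lower k ∈ pvPriorityKeys := by
            cases hix : pvPriorityKeys.idxOf? (PySem.Str.lower k) with
            | none => rw [hix] at hr; cases hr
            | some j =>
              by_contra hcon
              rw [List.idxOf?_eq_none_iff.mpr hcon] at hix
              cases hix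
          have hscan : pvPriorityScan (pvLowerToOriginal ks) pvPriorityKeys = none := by
            rw [h1, hbv]; rfl
          have hget := pvPriorityScan_none _ _ hscan (PySem.Str.lower k) hmem
          obtain ⟨w, hw⟩ := pvLower_mem ks k hk
          rw [hw] at hget; cases hget
      exact pvFallback_eq ks hnone
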